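-- pv_equiv track=rewrite | github.com/HaukurPall/game_theory | hw6/BG.py | k_nary
-- ===== SOURCE A (Python) =====
-- def k_nary(n, k, length, numbers=None):
--     """
--     Convert number to k-nary representation
--     :param k: The base to convert to
--     :param n: The number to convert
--     :param length: The length of list to be returned. We pad with 0
--     :return: A list of integers in k-nary representing n
--     """
--     if not numbers:
--         numbers = []
--     e = n // k
--     q = n % k
--     numbers.append(q)
--     if e == 0:
--         # we pad with 0
--         while len(numbers) < length:
--             numbers.append(0)
--         # we reverse the list so we end up with:
--         # 0 0 0 1  for k_nary(n=1, k=2, length=4)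
--         return numbers[::-1]
--     else:
--         return k_nary(n=e, k=k, length=length, numbers=numbers)
-- ===== SOURCE B (Python) =====
-- def k_nary(n, k, length, numbers=None):
--     # Return-value equivalent to A; does not mutate the caller's list (A appends to it).
--     digits = []
--     while True:
--         digits.append(n % k)
--         n = n // k
--         if n == 0:
--             break
--     prefix = list(numbers) if numbers else []
--     total = prefix + digits
--     return (total + [0] * (length - len(total)))[::-1]
-- ===== Notes on version B (the rewrite author's own statement) =====
-- stated objective: simpler
-- what changed: Replaces A's tail recursion (which threads the accumulator and pads inside the base case) by one iterative divide loop building the digit list, then arithmetic padding via [0]*(length-len(total)) instead of a while-append loop; B does not mutate the caller's numbers list.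
import Mathlib
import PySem

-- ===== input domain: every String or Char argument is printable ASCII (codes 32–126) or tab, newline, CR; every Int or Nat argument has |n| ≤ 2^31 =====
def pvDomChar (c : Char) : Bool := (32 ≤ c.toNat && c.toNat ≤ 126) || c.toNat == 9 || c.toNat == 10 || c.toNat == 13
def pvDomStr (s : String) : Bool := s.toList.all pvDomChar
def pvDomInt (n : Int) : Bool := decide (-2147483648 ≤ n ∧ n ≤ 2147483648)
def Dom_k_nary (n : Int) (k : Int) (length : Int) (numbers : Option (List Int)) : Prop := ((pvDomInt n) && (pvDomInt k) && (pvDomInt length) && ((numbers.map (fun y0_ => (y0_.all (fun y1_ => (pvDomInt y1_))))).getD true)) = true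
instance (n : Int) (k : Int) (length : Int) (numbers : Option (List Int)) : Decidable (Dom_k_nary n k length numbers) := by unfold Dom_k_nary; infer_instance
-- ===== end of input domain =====

-- B changes the decomposition: one iterative divide loop plus arithmetic padding, instead of
-- A's recursion that pads inside its base case. Equivalence is about the RETURN value only:
-- A appends to a caller-supplied list in place, B does not mutate it.

-- ===== PORT A =====
-- 'while len(numbers) < length: numbers.append(0)' of A, step for step
def padLoop (xs : List Int) (len : Int) : List Int :=
  if (xs.length : Int) < len then padLoop (xs ++ [0]) len else xs
termination_by (len - (xs.length : Int)).toNat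
decreasing_by simp; omega

-- A's recursion, with fuel as a totality device (A raises RecursionError outside Pre_;
-- inside Pre_ the fuel 2*|n|+2 is proved sufficient below)
def k_naryFuel : Nat → Int → Int → Int → List Int → List Int
  | 0, _, _, _, _ => []
  | f+1, n, k, len, numbers0 =>
    let e := PySem.Int.floordiv n k
    let q := PySem.Int.mod n k
    let numbers1 := numbers0 ++ [q]
    if e = 0 then (padLoop numbers1 len).reverse
    else k_naryFuel f e k len numbers1

def k_nary (n : Int) (k : Int) (length : Int) (numbers : Option (List Int)) : List Int :=
  -- 'if not numbers: numbers = []' — None becomes []; an empty list stays []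
  let nums : List Int := match numbers with | none => [] | some l => l
  k_naryFuel (2 * n.natAbs + 2) n k length nums

-- ===== PORT B =====
-- Source B's 'while True' divide loop (same fuel device; break when n // k == 0)
def digitsLoop : Nat → Int → Int → List Int
  | 0, _, _ => []
  | f+1, n, k =>
    let q := PySem.Int.mod n k
    let n' := PySem.Int.floordiv n k
    if n' = 0 then [q] else q :: digitsLoop f n' k

def k_nary_alt (n : Int) (k : Int) (length : Int) (numbers : Option (List Int)) : List Int :=
  let digits := digitsLoop (2 * n.natAbs + 2) n k
  let pref : List Int := match numbers with | none => [] | some l => l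
  let total := pref ++ digits
  -- [0] * (length - len(total)): negative multiplier gives [] = toNat clamping
  (total ++ List.replicate (length - (total.length : Int)).toNat 0).reverse

-- ===== PRECONDITION & SPEC =====
-- Pre_ is exactly where Python A returns: for k ≥ 2 with n < 0 and for k ∈ {-1,1} with n ≠ 0
-- the recursion never reaches 0 (RecursionError); for k = 0 it is a ZeroDivisionError.
def Pre_k_nary (n : Int) (k : Int) (length : Int) (numbers : Option (List Int)) : Prop :=
  (2 ≤ k ∧ 0 ≤ n) ∨ k ≤ -2 ∨ (n = 0 ∧ k ≠ 0)
instance (n : Int) (k : Int) (length : Int) (numbers : Option (List Int)) : Decidable (Pre_k_nary n k length numbers) := by unfold Pre_k_nary; infer_instance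

def pvWitness_k_nary : Int × Int × Int × Option (List Int) := (13, 2, 6, none)

def Spec_k_nary (n : Int) (k : Int) (length : Int) (numbers : Option (List Int)) (out : List Int) : Prop := out = k_nary_alt n k length numbers
instance (n : Int) (k : Int) (length : Int) (numbers : Option (List Int)) (out : List Int) : Decidable (Spec_k_nary n k length numbers out) := by unfold Spec_k_nary; infer_instance

-- ===== CLAIM (what is proved, stated in full; the proofs are below) =====
def Claim_equal_k_nary : Prop := ∀ (n : Int) (k : Int) (length : Int) (numbers : Option (List Int)), Dom_k_nary n k length numbers → Pre_k_nary n k length numbers → Spec_k_nary n k length numbers (k_nary n k length numbers)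

-- ===== LEMMAS AND PROOFS =====

-- closed form of A's pad loop = B's replicate padding
lemma padLoop_eq (xs : List Int) (len : Int) :
    padLoop xs len = xs ++ List.replicate (len - (xs.length : Int)).toNat 0 := by
  fun_induction padLoop xs len with
  | case1 xs hlt ih =>
      rw [ih]
      have h1 : (len - ((xs ++ [0]).length : Int)).toNat + 1 = (len - (xs.length : Int)).toNat := by
        simp; omega
      rw [← h1, List.replicate_succ]
      simp
  | case2 xs hlt =>
      have h0 : (len - (xs.length : Int)).toNat = 0 := by omega
      simp [h0]

-- loop measure: decreases at every recursive call inside Pre_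
def Mz (n : Int) : Nat := 2 * n.natAbs + (if 0 ≤ n then 1 else 0)

-- invariant preservation and measure decrease for one division step
lemma step_facts (n k : Int) (H : (2 ≤ k ∧ 0 ≤ n) ∨ k ≤ -2)
    (he : PySem.Int.floordiv n k ≠ 0) :
    ((2 ≤ k ∧ 0 ≤ PySem.Int.floordiv n k) ∨ k ≤ -2) ∧ Mz (PySem.Int.floordiv n k) < Mz n := by
  set e := PySem.Int.floordiv n k with hedef
  set r := PySem.Int.mod n k with hrdef
  have hid : e * k + r = n := PySem.Int.floordiv_mul_add_mod n k
  rcases H with ⟨hk, hn⟩ | hk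
  · -- k ≥ 2, n ≥ 0
    have hr0 : 0 ≤ r := PySem.Int.mod_nonneg n (by omega)
    have hr1 : r < k := PySem.Int.mod_lt n (by omega)
    have hge : 0 ≤ e := by nlinarith
    have hn1 : 1 ≤ n := by
      rcases eq_or_lt_of_le hn with h0 | h0
      · exfalso; apply he
        nlinarith [mul_nonneg hge (by omega : (0:Int) ≤ k - 2)]
      · omega
    have hlt : e < n := by
      by_contra h
      push Not at h
      nlinarith [mul_nonneg hge (by omega : (0:Int) ≤ k - 2)]
    refine ⟨Or.inl ⟨hk, hge⟩, ?_⟩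
    simp only [Mz]
    split_ifs <;> omega
  · -- k ≤ -2
    obtain ⟨hr0, hr1⟩ := PySem.Int.mod_neg_bounds n (b := k) (by omega)
    refine ⟨Or.inr hk, ?_⟩
    rcases lt_trichotomy n 0 with hn | hn | hn
    · -- n < 0 ⇒ e ≥ 1
      have hge : 0 ≤ e := by
        by_contra h
        push Not at h
        nlinarith [mul_nonneg (by omega : (0:Int) ≤ -(e+1)) (by omega : (0:Int) ≤ -k)]
      have h2 : 2 * e ≤ -n := by
        nlinarith [mul_nonneg hge (by omega : (0:Int) ≤ -k - 2)]
      simp only [Mz]; split_ifs <;> omega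
    · -- n = 0 ⇒ e = 0, contradicting he
      exfalso
      rcases lt_trichotomy e 0 with h | h | h
      · nlinarith [mul_nonneg (by omega : (0:Int) ≤ -e) (by omega : (0:Int) ≤ -k)]
      · exact he h
      · nlinarith [mul_nonneg (by omega : (0:Int) ≤ e - 1) (by omega : (0:Int) ≤ -k)]
    · -- n > 0 ⇒ e < 0
      have hle : e ≤ 0 := by
        by_contra h
        push Not at h
        nlinarith [mul_nonneg (by omega : (0:Int) ≤ e - 1) (by omega : (0:Int) ≤ -k)]
      have hlt0 : e < 0 := by omega
      have h2 : 2 * (-e) ≤ n + 1 := by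
        nlinarith [mul_nonneg (by omega : (0:Int) ≤ -(e+1)) (by omega : (0:Int) ≤ -(k+2))]
      simp only [Mz]; split_ifs <;> omega

-- A's recursion equals B's digit loop followed by padding and reversal, given enough fuel
lemma main_eq : ∀ (f : Nat) (n k len : Int) (acc : List Int),
    ((2 ≤ k ∧ 0 ≤ n) ∨ k ≤ -2) → Mz n < f →
    k_naryFuel f n k len acc = (padLoop (acc ++ digitsLoop f n k) len).reverse := by
  intro f
  induction f with
  | zero => intro n k len acc _ h; omega
  | succ f ih =>
    intro n k len acc H hf
    by_cases he : PySem.Int.floordiv n k = 0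
    · simp [k_naryFuel, digitsLoop, he]
    · obtain ⟨H', hM⟩ := step_facts n k H he
      simp only [k_naryFuel, digitsLoop, he]
      rw [ih _ _ _ _ H' (by omega)]
      simp

-- the one-step case (covers n = 0 with any k: the first quotient is already 0)
lemma one_step (f : Nat) (n k len : Int) (acc : List Int)
    (h : PySem.Int.floordiv n k = 0) :
    k_naryFuel (f+1) n k len acc = (padLoop (acc ++ digitsLoop (f+1) n k) len).reverse := by
  simp [k_naryFuel, digitsLoop, h]

-- ===== VERDICT (by name: the statement is the Claim_ definition above) =====
theorem k_nary_spec : Claim_equal_k_nary := by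
  intro n k len numbers _ hpre
  unfold Spec_k_nary
  have key : ∀ nums : List Int, k_naryFuel (2 * n.natAbs + 2) n k len nums =
      (padLoop (nums ++ digitsLoop (2 * n.natAbs + 2) n k) len).reverse := by
    intro nums
    rcases hpre with h | h | ⟨h0, hk⟩
    · exact main_eq _ n k len nums (Or.inl h) (by simp [Mz]; split_ifs <;> omega)
    · exact main_eq _ n k len nums (Or.inr h) (by simp [Mz]; split_ifs <;> omega)
    · subst h0
      exact one_step 1 0 k len nums (by simp [PySem.Int.floordiv])
  cases numbers with
  | none => simp only [k_nary, k_nary_alt]; rw [key, padLoop_eq]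
  | some l => simp only [k_nary, k_nary_alt]; rw [key, padLoop_eq]
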